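-- pv_equiv track=rewrite | github.com/lurenxing628/---- | tests/test_win7_launcher_runtime_paths.py | _command_line_matches_installer_profile
-- ===== SOURCE A (Python) =====
-- PROFILE_PREFIX = "--user-data-dir="
--
-- def _split_command_line_args(cmd: str) -> list[str]:
--     tokens: list[str] = []
--     buf: list[str] = []
--     in_quotes = False
--     cmd_text = str(cmd or "")
--     for index, ch in enumerate(cmd_text):
--         if ch == '"':
--             slash_count = 0
--             slash_index = index - 1
--             while slash_index >= 0 and cmd_text[slash_index] == "\\":
--                 slash_count += 1
--                 slash_index -= 1
--             if slash_count % 2 == 0: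
--                 in_quotes = not in_quotes
--                 continue
--         if not in_quotes and ch.isspace():
--             if buf:
--                 tokens.append("".join(buf))
--                 buf = []
--             continue
--         buf.append(ch)
--     if buf:
--         tokens.append("".join(buf))
--     return tokens
--
-- def _command_line_matches_installer_profile(cmd: str, exact_marker: str, suffix_marker: str) -> bool:
--     exact_lower = exact_marker.lower()
--     suffix_lower = suffix_marker.lower()
--     for arg in _split_command_line_args(cmd):
--         arg_lower = arg.lower()
--         if not arg_lower.startswith(PROFILE_PREFIX):
--             continue
--         profile = arg_lower[len(PROFILE_PREFIX) :]
--         if exact_lower and profile == exact_lower: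
--             return True
--         if suffix_lower and profile.endswith(suffix_lower):
--             return True
--     return False
-- ===== SOURCE B (Python) =====
-- PROFILE_PREFIX = "--user-data-dir="
--
-- def _command_line_matches_installer_profile(cmd, exact_marker, suffix_marker):
--     # Single forward pass: running consecutive-backslash counter instead of a
--     # backward rescan per quote, and tokens are checked as they complete.
--     exact_lower = exact_marker.lower()
--     suffix_lower = suffix_marker.lower()
--
--     def token_matches(token):
--         token_lower = token.lower()
--         if not token_lower.startswith(PROFILE_PREFIX):
--             return False
--         profile = token_lower[len(PROFILE_PREFIX):]
--         return (bool(exact_lower) and profile == exact_lower) or (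
--             bool(suffix_lower) and profile.endswith(suffix_lower)
--         )
--
--     buf = []
--     in_quotes = False
--     backslashes = 0
--     for ch in str(cmd or ""):
--         if ch == '"' and backslashes % 2 == 0:
--             in_quotes = not in_quotes
--         elif not in_quotes and ch.isspace():
--             if buf:
--                 if token_matches("".join(buf)):
--                     return True
--                 buf = []
--         else:
--             buf.append(ch)
--         backslashes = backslashes + 1 if ch == "\\" else 0
--     return bool(buf) and token_matches("".join(buf))
-- ===== Notes on version B (the rewrite author's own statement) =====
-- stated objective: alternative
-- what changed: B tokenizes in a single forward pass keeping a running consecutive-backslash counter (instead of rescanning backward from every quote) and tests each token for a profile match as soon as it completes, instead of building the full token list first and then scanning it.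
import Mathlib
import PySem

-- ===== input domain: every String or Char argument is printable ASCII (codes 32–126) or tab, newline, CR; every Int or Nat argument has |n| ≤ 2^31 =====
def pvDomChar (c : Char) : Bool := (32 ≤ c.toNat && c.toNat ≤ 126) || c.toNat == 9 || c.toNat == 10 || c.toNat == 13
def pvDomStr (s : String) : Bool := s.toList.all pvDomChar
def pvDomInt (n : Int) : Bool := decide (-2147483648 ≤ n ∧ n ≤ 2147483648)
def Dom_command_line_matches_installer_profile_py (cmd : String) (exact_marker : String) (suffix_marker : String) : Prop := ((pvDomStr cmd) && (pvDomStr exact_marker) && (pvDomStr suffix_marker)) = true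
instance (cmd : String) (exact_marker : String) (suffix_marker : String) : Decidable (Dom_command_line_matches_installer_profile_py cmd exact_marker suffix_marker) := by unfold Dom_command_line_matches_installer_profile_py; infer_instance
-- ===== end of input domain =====

-- B replaces A's per-quote backward backslash rescan by a running consecutive-backslash
-- counter and checks each token as it completes, in one pass (objective: alternative).

-- ===== PORT A =====
def pvProfilePrefix : List Char := "--user-data-dir=".toList

-- inner 'while slash_index >= 0 and cmd_text[slash_index] == "\\"' loop, counting downward from j
def pvSlashCountFrom (cs : List Char) : Nat → Nat
  | 0 => if cs[0]? = some '\\' then 1 else 0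
  | j + 1 => if cs[j + 1]? = some '\\' then pvSlashCountFrom cs j + 1 else 0

-- slash_count computed at enumerate index i (slash_index starts at i - 1)
def pvSlashCount (cs : List Char) (i : Int) : Nat :=
  if i - 1 < 0 then 0 else pvSlashCountFrom cs (i - 1).toNat

-- the 'for index, ch in enumerate(cmd_text)' loop of _split_command_line_args
-- (the '"' branch's two nested ifs are combined into one conjunction; on failure both fall through identically)
def pvSplitLoopA (cs : List Char) :
    List (Int × Char) → List (List Char) → List Char → Bool → List (List Char) × List Char
  | [], tokens, buf, _ => (tokens, buf)
  | (index, ch) :: rest, tokens, buf, inq =>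
    if ch = '"' ∧ pvSlashCount cs index % 2 = 0 then
      pvSplitLoopA cs rest tokens buf (!inq)
    else if ¬ inq = true ∧ PySem.Chars.isspace ch = true then
      if buf ≠ [] then pvSplitLoopA cs rest (tokens ++ [buf]) [] inq
      else pvSplitLoopA cs rest tokens buf inq
    else pvSplitLoopA cs rest tokens (buf ++ [ch]) inq

def pvSplitArgsA (cmd : String) : List (List Char) :=
  let cs := cmd.toList
  let r := pvSplitLoopA cs (PySem.List.enumerate cs 0) [] [] false
  if r.2 ≠ [] then r.1 ++ [r.2] else r.1

-- the 'for arg in _split_command_line_args(cmd)' loop with early return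
def pvMatchLoopA (ex su : List Char) : List (List Char) → Bool
  | [] => false
  | arg :: rest =>
    let al := PySem.Chars.lower arg
    if ¬ PySem.Chars.startswith al pvProfilePrefix = true then pvMatchLoopA ex su rest
    else
      let profile := PySem.List.slice al (some (16 : Int)) none
      if ex ≠ [] ∧ profile = ex then true
      else if su ≠ [] ∧ PySem.Chars.endswith profile su = true then true
      else pvMatchLoopA ex su rest

def command_line_matches_installer_profile_py (cmd : String) (exact_marker : String) (suffix_marker : String) : Bool :=
  pvMatchLoopA (PySem.Chars.lower exact_marker.toList) (PySem.Chars.lower suffix_marker.toList)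
    (pvSplitArgsA cmd)

-- ===== PORT B =====
def pvTokenMatchesB (ex su : List Char) (tok : List Char) : Bool :=
  let tl := PySem.Chars.lower tok
  if ¬ PySem.Chars.startswith tl pvProfilePrefix = true then false
  else
    let profile := PySem.List.slice tl (some (16 : Int)) none
    (decide (ex ≠ []) && decide (profile = ex)) ||
      (decide (su ≠ []) && PySem.Chars.endswith profile su)

-- Source B's single forward pass: state (buf, in_quotes, backslashes), early return on a matching token
def pvRunB (ex su : List Char) : List Char → List Char → Bool → Nat → Bool
  | [], buf, _, _ => decide (buf ≠ []) && pvTokenMatchesB ex su buf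
  | ch :: rest, buf, inq, bs =>
    let bs' := if ch = '\\' then bs + 1 else 0
    if ch = '"' ∧ bs % 2 = 0 then pvRunB ex su rest buf (!inq) bs'
    else if ¬ inq = true ∧ PySem.Chars.isspace ch = true then
      if buf ≠ [] then
        if pvTokenMatchesB ex su buf then true else pvRunB ex su rest [] inq bs'
      else pvRunB ex su rest buf inq bs'
    else pvRunB ex su rest (buf ++ [ch]) inq bs'

def command_line_matches_installer_profile_py_alt (cmd : String) (exact_marker : String) (suffix_marker : String) : Bool :=
  pvRunB (PySem.Chars.lower exact_marker.toList) (PySem.Chars.lower suffix_marker.toList)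
    cmd.toList [] false 0

-- ===== PRECONDITION & SPEC =====
def Spec_command_line_matches_installer_profile_py (cmd : String) (exact_marker : String) (suffix_marker : String) (out : Bool) : Prop := out = command_line_matches_installer_profile_py_alt cmd exact_marker suffix_marker
instance (cmd : String) (exact_marker : String) (suffix_marker : String) (out : Bool) : Decidable (Spec_command_line_matches_installer_profile_py cmd exact_marker suffix_marker out) := by unfold Spec_command_line_matches_installer_profile_py; infer_instance

-- ===== CLAIM (what is proved, stated in full; the proofs are below) =====
def Claim_equal_command_line_matches_installer_profile_py : Prop := ∀ (cmd : String) (exact_marker : String) (suffix_marker : String), Dom_command_line_matches_installer_profile_py cmd exact_marker suffix_marker → Spec_command_line_matches_installer_profile_py cmd exact_marker suffix_marker (command_line_matches_installer_profile_py cmd exact_marker suffix_marker)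

-- ===== LEMMAS AND PROOFS =====

-- proof-side tokenizer with a running backslash counter (bridge between the two loops)
def pvTkn : List Char → List Char → Bool → Nat → List (List Char)
  | [], buf, _, _ => if buf ≠ [] then [buf] else []
  | ch :: rest, buf, inq, bs =>
    let bs' := if ch = '\\' then bs + 1 else 0
    if ch = '"' ∧ bs % 2 = 0 then pvTkn rest buf (!inq) bs'
    else if ¬ inq = true ∧ PySem.Chars.isspace ch = true then
      if buf ≠ [] then buf :: pvTkn rest [] inq bs'
      else pvTkn rest buf inq bs'
    else pvTkn rest (buf ++ [ch]) inq bs'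

-- forward running count: pvNbs cs i = #consecutive backslashes immediately before position i
def pvNbs (cs : List Char) : Nat → Nat
  | 0 => 0
  | i + 1 => if cs[i]? = some '\\' then pvNbs cs i + 1 else 0

def pvFinish (r : List (List Char) × List Char) : List (List Char) :=
  if r.2 ≠ [] then r.1 ++ [r.2] else r.1

theorem pvSlashCountFrom_eq (cs : List Char) (j : Nat) :
    pvSlashCountFrom cs j = pvNbs cs (j + 1) := by
  induction j with
  | zero => simp [pvSlashCountFrom, pvNbs]
  | succ j ih => simp [pvSlashCountFrom, pvNbs, ih]

theorem pvSlashCount_eq (cs : List Char) (i : Nat) :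
    pvSlashCount cs (i : Int) = pvNbs cs i := by
  cases i with
  | zero => simp [pvSlashCount, pvNbs]
  | succ k =>
      simp [pvSlashCount, pvSlashCountFrom_eq]

theorem pvNbs_succ (cs : List Char) (i : Nat) (ch : Char) (h : cs.drop i = ch :: (cs.drop (i + 1))) :
    pvNbs cs (i + 1) = if ch = '\\' then pvNbs cs i + 1 else 0 := by
  have hget : cs[i]? = some ch := by
    have h0 : (cs.drop i)[0]? = some ch := by rw [h]; rfl
    simpa using h0
  by_cases hch : ch = '\\' <;> simp [pvNbs, hget, hch]

theorem pvLoopA_tkn (cs : List Char) : ∀ (rest : List Char) (i : Nat),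
    cs.drop i = rest → ∀ (tokens : List (List Char)) (buf : List Char) (inq : Bool),
    pvFinish (pvSplitLoopA cs (PySem.List.enumerate rest (i : Int)) tokens buf inq)
      = tokens ++ pvTkn rest buf inq (pvNbs cs i) := by
  intro rest
  induction rest with
  | nil =>
      intro i _ tokens buf inq
      simp only [PySem.List.enumerate_nil, pvSplitLoopA, pvTkn, pvFinish]
      by_cases hb : buf = [] <;> simp [hb]
  | cons ch rest ih =>
      intro i hdrop tokens buf inq
      have hdrop' : cs.drop (i + 1) = rest := by
        have h1 := congrArg (List.drop 1) hdrop
        simpa [List.drop_drop] using h1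
      have hnbs : pvNbs cs (i + 1) = if ch = '\\' then pvNbs cs i + 1 else 0 :=
        pvNbs_succ cs i ch (by rw [hdrop, hdrop'])
      have hcast : (i : Int) + 1 = ((i + 1 : Nat) : Int) := by push_cast; ring
      rw [PySem.List.enumerate_cons]
      simp only [pvSplitLoopA, pvTkn, pvSlashCount_eq, hcast]
      by_cases hq : ch = '"' ∧ pvNbs cs i % 2 = 0
      · simp only [if_pos hq]
        rw [ih (i + 1) hdrop' tokens buf (!inq), hnbs]
      · simp only [if_neg hq]
        by_cases hs : ¬ inq = true ∧ PySem.Chars.isspace ch = true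
        · simp only [if_pos hs]
          by_cases hb : buf = []
          · subst hb
            rw [if_neg (show ¬ (([] : List Char) ≠ []) from fun h => h rfl),
              if_neg (show ¬ (([] : List Char) ≠ []) from fun h => h rfl),
              ih (i + 1) hdrop' tokens [] inq, hnbs]
          · rw [if_pos hb, if_pos hb, ih (i + 1) hdrop' (tokens ++ [buf]) [] inq, hnbs]
            simp
        · simp only [if_neg hs]
          rw [ih (i + 1) hdrop' tokens (buf ++ [ch]) inq, hnbs]

theorem pvRunB_eq_any (ex su : List Char) : ∀ (rest buf : List Char) (inq : Bool) (bs : Nat),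
    pvRunB ex su rest buf inq bs = (pvTkn rest buf inq bs).any (pvTokenMatchesB ex su) := by
  intro rest
  induction rest with
  | nil =>
      intro buf inq bs
      by_cases hb : buf = [] <;> simp [pvRunB, pvTkn, hb]
  | cons ch rest ih =>
      intro buf inq bs
      simp only [pvRunB, pvTkn]
      by_cases hq : ch = '"' ∧ bs % 2 = 0
      · simp only [if_pos hq]; exact ih _ _ _
      · simp only [if_neg hq]
        by_cases hs : ¬ inq = true ∧ PySem.Chars.isspace ch = true
        · simp only [if_pos hs]
          by_cases hb : buf = []
          · simp [hb, ih]
          · simp only [ne_eq, hb, not_false_eq_true, if_pos, List.any_cons]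
            by_cases hm : pvTokenMatchesB ex su buf = true <;> simp [hm, ih]
        · simp only [if_neg hs]; exact ih _ _ _

theorem pvMatchLoopA_eq_any (ex su : List Char) : ∀ (l : List (List Char)),
    pvMatchLoopA ex su l = l.any (pvTokenMatchesB ex su) := by
  intro l
  induction l with
  | nil => simp [pvMatchLoopA]
  | cons arg rest ih =>
      simp only [pvMatchLoopA, pvTokenMatchesB, List.any_cons]
      by_cases hp : PySem.Chars.startswith (PySem.Chars.lower arg) pvProfilePrefix = true
      · rw [if_neg (not_not_intro hp), if_neg (not_not_intro hp)]
        by_cases h1 : ex ≠ [] ∧ PySem.List.slice (PySem.Chars.lower arg) (some (16 : Int)) none = ex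
        · simp [h1]
        · by_cases h2 : su ≠ [] ∧ PySem.Chars.endswith (PySem.List.slice (PySem.Chars.lower arg) (some (16 : Int)) none) su = true
          · simp [h1, h2]
          · have e1 : (decide (ex ≠ []) && decide (PySem.List.slice (PySem.Chars.lower arg) (some (16 : Int)) none = ex)) = false := by
              by_cases he : ex = []
              · simp [he]
              · simp only [ne_eq, he, not_false_eq_true, decide_true, Bool.true_and,
                  decide_eq_false_iff_not]
                exact fun hsl => h1 ⟨he, hsl⟩
            have e2 : (decide (su ≠ []) && PySem.Chars.endswith (PySem.List.slice (PySem.Chars.lower arg) (some (16 : Int)) none) su) = false := by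
              by_cases hsu : su = []
              · simp [hsu]
              · simp only [ne_eq, hsu, not_false_eq_true, decide_true, Bool.true_and]
                exact Bool.eq_false_iff.mpr (fun hes => h2 ⟨hsu, hes⟩)
            rw [if_neg h1, if_neg h2, ih, e1, e2]
            simp
      · rw [if_pos hp, if_pos hp, ih]
        simp

-- ===== VERDICT (by name: the statement is the Claim_ definition above) =====
theorem command_line_matches_installer_profile_py_spec : Claim_equal_command_line_matches_installer_profile_py := by
  intro cmd ex su _
  unfold Spec_command_line_matches_installer_profile_py
  unfold command_line_matches_installer_profile_py command_line_matches_installer_profile_py_alt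
  rw [pvMatchLoopA_eq_any, pvRunB_eq_any]
  congr 1
  have h := pvLoopA_tkn cmd.toList cmd.toList 0 (by simp) [] [] false
  simpa [pvSplitArgsA, pvFinish, pvNbs] using h
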